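-- pv_equiv track=rewrite | github.com/legical/Cutlery | PTATM/PWCETGenerator/CopulaTool.py | makeValid
-- ===== SOURCE A (Python) =====
-- from collections import OrderedDict
--
-- def makeValid(data: OrderedDict):
--     """
--     对于data中所有key对应的list，执行以下操作：
--     1. 如果list长度不一致，以最短的长度为基准，截断所有list。
--     2. 如果某个list中的某个元素<=0，删除所有list中该元素下标的元素。
--     """
--     # 找到所有列表中最短的长度
--     min_length = min(map(len, filter(lambda x: isinstance(x, list), data.values())))
--
--     # 截断所有列表为最小长度
--     data = {k: v[:min_length] if isinstance(v, list) else v for k, v in data.items()}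
--
--     # 删除所有列表中元素<=0的项
--     idx = 0
--     while idx < min_length:
--         if any(lst[idx] <= 0 for lst in data.values() if isinstance(lst, list)):
--             data = {k: [v[i] for i in range(min_length) if i != idx] if isinstance(
--                 v, list) else v for k, v in data.items()}
--             min_length -= 1  # 删除元素后列表长度减1
--         else:
--             idx += 1    # 只有在不删除元素的情况下，才增加索引
--
--     return data
-- ===== SOURCE B (Python) =====
-- def makeValid(data):
--     # Same min expression as A (so an empty dict still raises ValueError).
--     min_length = min(map(len, filter(lambda x: isinstance(x, list), data.values())))
--     # One scan to find the indices of the columns every list keeps (all entries > 0),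
--     # then a single rebuild pass -- no restart-on-delete while loop.
--     keep = [i for i in range(min_length)
--             if all(v[i] > 0 for v in data.values() if isinstance(v, list))]
--     return {k: [v[i] for i in keep] if isinstance(v, list) else v
--             for k, v in data.items()}
-- ===== Notes on version B (the rewrite author's own statement) =====
-- stated objective: faster
-- what changed: A's rebuild-and-restart while loop (which deletes one bad column at a time and rebuilds every list on each deletion) is replaced by one scan that precomputes the list of column indices where every list is positive, followed by a single dict-comprehension rebuild.
import Mathlib
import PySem

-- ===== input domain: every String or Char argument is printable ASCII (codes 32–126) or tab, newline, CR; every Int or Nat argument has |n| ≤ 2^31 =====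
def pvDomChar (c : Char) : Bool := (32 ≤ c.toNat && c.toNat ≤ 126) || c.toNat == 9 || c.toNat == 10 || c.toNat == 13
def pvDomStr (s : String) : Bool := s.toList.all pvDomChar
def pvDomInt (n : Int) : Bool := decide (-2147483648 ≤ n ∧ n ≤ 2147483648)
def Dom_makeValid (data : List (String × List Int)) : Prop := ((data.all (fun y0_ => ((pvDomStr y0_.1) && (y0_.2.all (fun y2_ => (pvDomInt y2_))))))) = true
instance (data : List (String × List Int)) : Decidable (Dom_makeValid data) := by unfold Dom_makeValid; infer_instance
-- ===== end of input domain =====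

-- B replaces A's restart-on-delete while loop (which rebuilds every list after each column
-- deletion) by one precomputed keep-index list and a single rebuild pass (objective: faster,
-- measured). Neither version mutates its argument.

-- ===== PORT A =====
-- all values of the dict are lists here, so Python's `isinstance(v, list)` is always true
-- and the filters keep everything; `lst[idx]` is only evaluated with idx < min length, so
-- `getD idx 0` coincides with Python's indexing on every reached input.
def makeValid_badCol (d : List (String × List Int)) (idx : Nat) : Bool :=
  d.any (fun kv => decide (kv.2.getD idx 0 ≤ 0))

-- `[v[i] for i in range(min_length) if i != idx]`
def makeValid_delCol (d : List (String × List Int)) (ml idx : Nat) : List (String × List Int) :=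
  d.map (fun kv => (kv.1, ((List.range ml).filter (fun i => i ≠ idx)).map (fun i => kv.2.getD i 0)))

def makeValid_loop (d : List (String × List Int)) (ml idx : Nat) : List (String × List Int) :=
  if idx < ml then
    if makeValid_badCol d idx then makeValid_loop (makeValid_delCol d ml idx) (ml - 1) idx
    else makeValid_loop d ml (idx + 1)
  else d
termination_by ml - idx
decreasing_by all_goals omega

def makeValid (data : List (String × List Int)) : List (String × List Int) :=
  -- min(map(len, ...)); Pre_ excludes the empty dict on which Python's min raises ValueError
  let ml := ((data.map (fun kv => kv.2.length)).min?).getD 0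
  -- v[:min_length]
  let d := data.map (fun kv => (kv.1, kv.2.take ml))
  makeValid_loop d ml 0

-- ===== PORT B =====
def makeValid_alt (data : List (String × List Int)) : List (String × List Int) :=
  let ml := ((data.map (fun kv => kv.2.length)).min?).getD 0
  let keep := (List.range ml).filter (fun i => data.all (fun kv => decide (0 < kv.2.getD i 0)))
  data.map (fun kv => (kv.1, keep.map (fun i => kv.2.getD i 0)))

-- ===== PRECONDITION & SPEC =====
-- Pre_ excludes only the empty dict, on which A's `min` raises ValueError (B raises there too).
def Pre_makeValid (data : List (String × List Int)) : Prop := data ≠ []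
instance (data : List (String × List Int)) : Decidable (Pre_makeValid data) := by unfold Pre_makeValid; infer_instance
def pvWitness_makeValid : (List (String × List Int)) := [("a", [1, -2, 3]), ("b", [4, 5, 6, 7])]

def Spec_makeValid (data : List (String × List Int)) (out : List (String × List Int)) : Prop := out = makeValid_alt data
instance (data : List (String × List Int)) (out : List (String × List Int)) : Decidable (Spec_makeValid data out) := by unfold Spec_makeValid; infer_instance

-- ===== CLAIM (what is proved, stated in full; the proofs are below) =====
def Claim_equal_makeValid : Prop := ∀ (data : List (String × List Int)), Dom_makeValid data → Pre_makeValid data → Spec_makeValid data (makeValid data)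

-- ===== LEMMAS AND PROOFS =====

-- d restricted to a list of column indices
def pvRestrict (d0 : List (String × List Int)) (cols : List Nat) : List (String × List Int) :=
  d0.map (fun kv => (kv.1, cols.map (fun i => kv.2.getD i 0)))

def pvGoodCol (d0 : List (String × List Int)) (c : Nat) : Bool :=
  d0.all (fun kv => decide (0 < kv.2.getD c 0))

lemma pv_map_getD_range (v : List Int) (ml : Nat) (h : ml ≤ v.length) :
    (List.range ml).map (fun i => v.getD i 0) = v.take ml := by
  induction ml with
  | zero => simp
  | succ n ih =>
      rw [List.range_succ, List.map_append, ih (by omega), List.take_add_one]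
      have hn : n < v.length := by omega
      simp [List.getD, List.getElem?_eq_getElem hn]

lemma pv_filtmap (l : List Int) (idx : Nat) :
    ((List.range l.length).filter (fun i => i ≠ idx)).map (fun i => l.getD i 0) = l.eraseIdx idx := by
  induction l generalizing idx with
  | nil => simp
  | cons a t ih =>
      rw [List.length_cons, List.range_succ_eq_map, List.filter_cons]
      cases idx with
      | zero =>
          rw [if_neg (by simp), List.filter_map]
          have hft : (List.range t.length).filter ((fun i => decide (i ≠ 0)) ∘ Nat.succ)
              = List.range t.length := by
            apply List.filter_eq_self.2; intro a _; simp [Function.comp]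
          rw [hft, List.map_map]
          have := pv_map_getD_range t t.length le_rfl
          simpa [Function.comp] using this
      | succ j =>
          rw [if_pos (by simp), List.filter_map, List.map_cons, List.map_map]
          have hft : (List.range t.length).filter ((fun i => decide (i ≠ j + 1)) ∘ Nat.succ)
              = (List.range t.length).filter (fun i => decide (i ≠ j)) := by
            apply List.filter_congr; intro a _; simp [Function.comp]
          rw [hft]
          have := ih j
          simp only [List.getD_cons_zero]
          simpa [List.eraseIdx] using this

lemma pv_getD_map_cols (cols : List Nat) (idx : Nat) (h : idx < cols.length) (v : List Int) :
    (cols.map (fun i => v.getD i 0)).getD idx 0 = v.getD (cols.getD idx 0) 0 := by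
  have hc : cols.getD idx 0 = cols[idx] := by
    simp [List.getD, List.getElem?_eq_getElem h]
  have h2 : idx < (cols.map (fun i => v.getD i 0)).length := by simpa using h
  rw [hc, List.getD, List.getElem?_eq_getElem h2, Option.getD_some, List.getElem_map]

lemma pv_badCol_restrict (d0 : List (String × List Int)) (cols : List Nat) (idx : Nat)
    (h : idx < cols.length) :
    makeValid_badCol (pvRestrict d0 cols) idx = !pvGoodCol d0 (cols.getD idx 0) := by
  unfold makeValid_badCol pvRestrict pvGoodCol
  rw [List.any_map, List.any_eq_not_all_not]
  refine congrArg (fun b => !b) (List.all_congr rfl ?_)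
  intro kv
  simp only [Function.comp]
  rw [pv_getD_map_cols cols idx h kv.2, ← decide_not, decide_eq_decide]
  omega

lemma pv_delCol_restrict (d0 : List (String × List Int)) (cols : List Nat) (idx : Nat) :
    makeValid_delCol (pvRestrict d0 cols) cols.length idx = pvRestrict d0 (cols.eraseIdx idx) := by
  unfold makeValid_delCol pvRestrict
  rw [List.map_map]
  apply List.map_congr_left
  intro kv _
  simp only [Function.comp]
  congr 1
  have := pv_filtmap (cols.map (fun i => kv.2.getD i 0)) idx
  rw [List.length_map] at this
  rw [this, List.eraseIdx_map]

lemma pv_loop_restrict (d0 : List (String × List Int)) (n : Nat) :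
    ∀ (cols : List Nat) (idx : Nat), cols.length - idx ≤ n →
    (∀ j ∈ cols.take idx, pvGoodCol d0 j = true) →
    makeValid_loop (pvRestrict d0 cols) cols.length idx
      = pvRestrict d0 (cols.take idx ++ (cols.drop idx).filter (fun c => pvGoodCol d0 c)) := by
  induction n with
  | zero =>
      intro cols idx hn _
      unfold makeValid_loop
      rw [if_neg (by omega)]
      rw [List.take_of_length_le (by omega), List.drop_eq_nil_of_le (by omega)]
      simp
  | succ n ih =>
      intro cols idx hn hpre
      by_cases h : idx < cols.length
      · unfold makeValid_loop
        rw [if_pos h, pv_badCol_restrict d0 cols idx h]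
        have hget : cols.getD idx 0 = cols[idx] := by
          simp [List.getD, List.getElem?_eq_getElem h]
        cases hg : pvGoodCol d0 cols[idx] with
        | true =>
            rw [hget, hg, if_neg (by decide)]
            have hpre' : ∀ j ∈ cols.take (idx + 1), pvGoodCol d0 j = true := by
              intro j hj
              rw [List.take_add_one, List.getElem?_eq_getElem h] at hj
              simp only [List.mem_append, Option.toList_some, List.mem_singleton] at hj
              rcases hj with hj | hj
              · exact hpre j hj
              · rw [hj]; exact hg
            rw [ih cols (idx + 1) (by omega) hpre']
            have htk1 : List.take (idx + 1) cols = List.take idx cols ++ [cols[idx]] := by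
              rw [List.take_add_one, List.getElem?_eq_getElem h]; rfl
            rw [htk1, List.drop_eq_getElem_cons h, List.filter_cons, if_pos (by simpa using hg)]
            rw [List.append_assoc, List.singleton_append]
        | false =>
            rw [hget, hg, if_pos (by decide)]
            have hlen : (cols.eraseIdx idx).length = cols.length - 1 :=
              List.length_eraseIdx_of_lt h
            have herase : cols.eraseIdx idx = cols.take idx ++ cols.drop (idx + 1) :=
              List.eraseIdx_eq_take_drop_succ cols idx
            have htk : (cols.eraseIdx idx).take idx = cols.take idx := by
              rw [herase, List.take_append_of_le_length (by simp <;> omega), List.take_take]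
              simp
            have hdr : (cols.eraseIdx idx).drop idx = cols.drop (idx + 1) := by
              rw [herase, List.drop_append_of_le_length (by simp <;> omega)]
              rw [List.drop_of_length_le (by simp), List.nil_append]
            rw [pv_delCol_restrict d0 cols idx, ← hlen]
            rw [ih (cols.eraseIdx idx) idx (by omega) (by intro j hj; exact hpre j (htk ▸ hj))]
            rw [htk, hdr, List.drop_eq_getElem_cons h]
            rw [List.filter_cons, if_neg (by simp [hg])]
      · unfold makeValid_loop
        rw [if_neg (by omega)]
        rw [List.take_of_length_le (by omega), List.drop_eq_nil_of_le (by omega)]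
        simp

lemma pv_truncate_eq_restrict (data : List (String × List Int)) (ml : Nat)
    (h : ∀ kv ∈ data, ml ≤ kv.2.length) :
    data.map (fun kv => (kv.1, kv.2.take ml)) = pvRestrict data (List.range ml) := by
  unfold pvRestrict
  apply List.map_congr_left
  intro kv hkv
  rw [pv_map_getD_range kv.2 ml (h kv hkv)]

-- ===== VERDICT (by name: the statement is the Claim_ definition above) =====
theorem makeValid_spec : Claim_equal_makeValid := by
  intro data _ hpre
  unfold Spec_makeValid
  simp only [makeValid, makeValid_alt]
  set ml := ((data.map (fun kv => kv.2.length)).min?).getD 0 with hml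
  have hle : ∀ kv ∈ data, ml ≤ kv.2.length := by
    intro kv hkv
    exact List.min?_getD_le_of_mem (List.mem_map_of_mem hkv)
  rw [pv_truncate_eq_restrict data ml hle]
  have hloop := pv_loop_restrict data ((List.range ml).length) (List.range ml) 0 le_rfl (by simp)
  rw [List.length_range] at hloop
  rw [hloop]
  simp only [List.take_zero, List.drop_zero, List.nil_append]
  rfl
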